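-- pv_equiv track=rewrite | github.com/gingertonwatts/Tensor-Stream | mps_2d_encoding_tools.py | convert_to_indices
-- ===== SOURCE A (Python) =====
-- def convert_to_indices(bits):
--     """
--     Converts a list of bits into two indices, `i` and `j`,
--     based on alternating bit positions for an arbitrary number of bits.
--
--     Args:
--         bits (list[int]): A list of bits (0 or 1) of even length.
--
--     Returns:
--         tuple: Two integers `i` and `j` representing the binary indices.
--     """
--     # Ensure the number of bits is even
--     if len(bits) % 2 != 0:
--         raise ValueError("The number of bits must be even.")
--
--     # Split bits into x_bits and y_bits
--     x_bits = bits[0::2]  # Extract bits at even indices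
--     y_bits = bits[1::2]  # Extract bits at odd indices
--
--     # Convert bit lists to integers
--     i = sum(bit * (2 ** idx) for idx, bit in enumerate(reversed(x_bits)))
--     j = sum(bit * (2 ** idx) for idx, bit in enumerate(reversed(y_bits)))
--
--     return i, j
-- ===== SOURCE B (Python) =====
-- def convert_to_indices(bits):
--     """Same result as A: one forward pass with two Horner accumulators,
--     no slicing, no reversal, no intermediate lists, no per-bit 2**idx recomputation."""
--     if len(bits) % 2 != 0:
--         raise ValueError("The number of bits must be even.")
--     i = j = 0
--     for k in range(0, len(bits), 2):
--         i = i * 2 + bits[k]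
--         j = j * 2 + bits[k + 1]
--     return i, j
-- ===== Notes on version B (the rewrite author's own statement) =====
-- stated objective: faster
-- what changed: Replaces the two step-2 slices, the two reversed/enumerate passes and the per-bit 2**idx recomputation with a single forward pass keeping two Horner accumulators (i = i*2 + bits[k], j = j*2 + bits[k+1]).
import Mathlib
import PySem

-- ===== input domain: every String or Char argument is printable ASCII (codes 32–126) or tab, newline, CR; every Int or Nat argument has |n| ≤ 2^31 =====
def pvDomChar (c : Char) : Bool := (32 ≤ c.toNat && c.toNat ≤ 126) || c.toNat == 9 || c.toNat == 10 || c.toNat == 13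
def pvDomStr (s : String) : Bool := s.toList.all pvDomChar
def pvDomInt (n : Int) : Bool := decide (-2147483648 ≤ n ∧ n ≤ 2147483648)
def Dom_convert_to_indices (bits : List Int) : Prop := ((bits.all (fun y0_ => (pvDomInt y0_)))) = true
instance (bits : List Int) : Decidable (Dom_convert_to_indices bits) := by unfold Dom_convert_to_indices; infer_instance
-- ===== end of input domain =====

-- B replaces A's two step-2 slices plus two reversed/enumerate power sums by one forward
-- pass with two Horner accumulators: one O(n) pass, no per-bit 2**idx recomputation (objective: faster).

-- ===== PORT A =====
-- sum(bit * (2 ** idx) for idx, bit in enumerate(reversed(xs))): the enumerate indices are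
-- nonnegative, so '2 ** idx' is ported exactly as '2 ^ idx.toNat'.
def pvPowSum (xs : List Int) : Int :=
  ((PySem.List.enumerate xs.reverse 0).map (fun p => p.2 * 2 ^ p.1.toNat)).sum

def convert_to_indices (bits : List Int) : Int × Int :=
  -- bits[0::2] / bits[1::2]: step 2 ≠ 0, so slice? always returns some and getD [] never fires
  let x_bits := (PySem.List.slice? bits (some 0) none 2).getD []
  let y_bits := (PySem.List.slice? bits (some 1) none 2).getD []
  (pvPowSum x_bits, pvPowSum y_bits)

-- ===== PORT B =====
def convert_to_indices_alt (bits : List Int) : Int × Int :=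
  (PySem.List.pyRange 0 (bits.length : Int) 2).foldl
    (fun (acc : Int × Int) k =>
      (acc.1 * 2 + PySem.List.pyGetD bits k 0, acc.2 * 2 + PySem.List.pyGetD bits (k + 1) 0))
    (0, 0)

-- ===== PRECONDITION & SPEC =====
-- A raises ValueError exactly on odd-length input (and so does B); Pre_ excludes nothing A returns on.
def Pre_convert_to_indices (bits : List Int) : Prop := bits.length % 2 = 0
instance (bits : List Int) : Decidable (Pre_convert_to_indices bits) := by
  unfold Pre_convert_to_indices; infer_instance
def pvWitness_convert_to_indices : List Int := [1, 0, 0, 1]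

def Spec_convert_to_indices (bits : List Int) (out : Int × Int) : Prop := out = convert_to_indices_alt bits
instance (bits : List Int) (out : Int × Int) : Decidable (Spec_convert_to_indices bits out) := by unfold Spec_convert_to_indices; infer_instance

-- ===== CLAIM (what is proved, stated in full; the proofs are below) =====
def Claim_equal_convert_to_indices : Prop := ∀ (bits : List Int), Dom_convert_to_indices bits → Pre_convert_to_indices bits → Spec_convert_to_indices bits (convert_to_indices bits)

-- ===== LEMMAS AND PROOFS =====

def pvEvens : List Int → List Int
  | [] => []
  | [x] => [x]
  | x :: _ :: t => x :: pvEvens t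

theorem pvCore (t : List Int) :
    List.filterMap (fun k : Nat => t[2 * k]?) (List.range ((t.length + 1) / 2)) = pvEvens t := by
  induction t using pvEvens.induct with
  | case1 => simp [pvEvens]
  | case2 x => simp [pvEvens, List.range_succ_eq_map]
  | case3 x y t ih =>
    have hc : (((x :: y :: t).length + 1) / 2) = (t.length + 1) / 2 + 1 := by
      simp; omega
    rw [hc, List.range_succ_eq_map, List.filterMap_cons, List.filterMap_map]
    have hb : (fun k : Nat => (x :: y :: t)[2 * k]?) ∘ Nat.succ
        = fun k : Nat => t[2 * k]? := by
      funext k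
      have : 2 * Nat.succ k = (2 * k) + 1 + 1 := by omega
      simp [this]
    rw [hb, ih]
    simp [pvEvens]

theorem pvSlice_evens (xs : List Int) :
    PySem.List.slice? xs (some 0) none 2 = some (pvEvens xs) := by
  simp only [PySem.List.slice?, PySem.List.sliceIndices]
  norm_num
  have hcount : (if 0 < xs.length then (((xs.length : Int) + 2 - 1) / 2).toNat else 0)
      = (xs.length + 1) / 2 := by
    split_ifs with h <;> omega
  rw [hcount, ← pvCore xs]
  apply List.filterMap_congr
  intro k _
  have h2 : ((2 : Int) * (k : Int)).toNat = 2 * k := by omega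
  rw [h2]

theorem pvSlice_odds (xs : List Int) :
    PySem.List.slice? xs (some 1) none 2 = some (pvEvens xs.tail) := by
  simp only [PySem.List.slice?, PySem.List.sliceIndices]
  norm_num
  rcases xs with _ | ⟨x, t⟩
  · simp [pvEvens]
  · have hmin : min (1 : Int) ((x :: t).length : Int) = 1 := by simp
    rw [hmin]
    have hcount : (if 1 < (x :: t).length then ((((x :: t).length : Int) - 1 + 2 - 1) / 2).toNat else 0)
        = (t.length + 1) / 2 := by
      simp only [List.length_cons]
      split_ifs with h <;> omega
    rw [hcount, List.tail_cons, ← pvCore t]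
    apply List.filterMap_congr
    intro k _
    have h2 : ((1 : Int) + 2 * (k : Int)).toNat = 2 * k + 1 := by omega
    rw [h2, List.getElem?_cons_succ]

theorem pvRange_two_cons (b : Int) (h : 0 < b) :
    PySem.List.pyRange 0 b 2 = 0 :: PySem.List.pyRange 2 b 2 := by
  rw [PySem.List.pyRange_of_pos 0 b (by norm_num),
      PySem.List.pyRange_of_pos 2 b (by norm_num)]
  rw [if_pos h]
  by_cases h2 : 2 < b
  · rw [if_pos h2]
    have hc : ((b - 0 + 2 - 1) / 2).toNat = ((b - 2 + 2 - 1) / 2).toNat + 1 := by omega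
    rw [hc, List.range_succ_eq_map, List.map_cons, List.map_map]
    norm_num
    intro k _
    ring
  · rw [if_neg h2]
    have hc : ((b - 0 + 2 - 1) / 2).toNat = 1 := by omega
    rw [hc]
    simp [List.range_succ_eq_map]

theorem pvRange_two_shift (b : Int) :
    PySem.List.pyRange 2 b 2 = (PySem.List.pyRange 0 (b - 2) 2).map (· + 2) := by
  rw [PySem.List.pyRange_of_pos 2 b (by norm_num),
      PySem.List.pyRange_of_pos 0 (b - 2) (by norm_num)]
  rw [List.map_map]
  by_cases h : 2 < b
  · rw [if_pos h, if_pos (by omega : (0:Int) < b - 2)]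
    have hc : ((b - 2 + 2 - 1) / 2).toNat = ((b - 2 - 0 + 2 - 1) / 2).toNat := by omega
    rw [hc]
    apply List.map_congr_left
    intro k _
    simp [Function.comp]
    ring
  · rw [if_neg h, if_neg (by omega : ¬ (0:Int) < b - 2)]
    rfl

def pvHorner (a : Int) (l : List Int) : Int := l.foldl (fun a b => a * 2 + b) a

theorem pvHorner_acc (l : List Int) : ∀ a : Int,
    pvHorner a l = a * 2 ^ l.length + pvHorner 0 l := by
  induction l with
  | nil => intro a; simp [pvHorner]
  | cons b l ih =>
    intro a
    simp only [pvHorner, List.foldl_cons, List.length_cons] at *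
    rw [ih (a * 2 + b), ih (0 * 2 + b)]
    ring

theorem pvPowSum_eq_horner (xs : List Int) : pvPowSum xs = pvHorner 0 xs := by
  induction xs with
  | nil => simp [pvPowSum, pvHorner]
  | cons x t ih =>
    have h1 : pvPowSum (x :: t) = pvPowSum t + x * 2 ^ t.length := by
      simp only [pvPowSum, List.reverse_cons, PySem.List.enumerate_append]
      simp [PySem.List.enumerate]
    have h2 : pvHorner 0 (x :: t) = pvHorner x t := by simp [pvHorner]
    rw [h1, ih, h2, pvHorner_acc t x]
    ring

theorem pvEvens_length (t : List Int) : (pvEvens t).length = (t.length + 1) / 2 := by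
  induction t using pvEvens.induct with
  | case1 => simp [pvEvens]
  | case2 x => simp [pvEvens]
  | case3 x y t ih => simp only [pvEvens, List.length_cons] at *; omega

theorem pvGetD_cons_succ (x : Int) (l : List Int) (k : Int) (hk : 0 ≤ k) (d : Int) :
    PySem.List.pyGetD (x :: l) (k + 1) d = PySem.List.pyGetD l k d := by
  rw [PySem.List.pyGetD_of_nonneg _ _ (by omega), PySem.List.pyGetD_of_nonneg _ _ hk]
  have h1 : (k + 1).toNat = k.toNat + 1 := by omega
  simp [h1]

theorem pvB_fold (bits : List Int) (hev : bits.length % 2 = 0) : ∀ i j : Int,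
    (PySem.List.pyRange 0 (bits.length : Int) 2).foldl
      (fun (acc : Int × Int) k =>
        (acc.1 * 2 + PySem.List.pyGetD bits k 0, acc.2 * 2 + PySem.List.pyGetD bits (k + 1) 0))
      (i, j)
    = (i * 2 ^ (bits.length / 2) + pvHorner 0 (pvEvens bits),
       j * 2 ^ (bits.length / 2) + pvHorner 0 (pvEvens bits.tail)) := by
  induction bits using pvEvens.induct with
  | case1 =>
    intro i j
    simp [PySem.List.pyRange, pvEvens, pvHorner]
  | case2 x => simp at hev
  | case3 x y t iht =>
    intro i j
    have hev' : t.length % 2 = 0 := by simp at hev; omega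
    have hlen : (((x :: y :: t).length : Int)) = (t.length : Int) + 2 := by simp; ring
    rw [hlen, pvRange_two_cons _ (by omega), pvRange_two_shift]
    have hshift : ((t.length : Int) + 2 - 2) = (t.length : Int) := by ring
    rw [hshift]
    simp only [List.foldl_cons, List.foldl_map]
    have hget0 : PySem.List.pyGetD (x :: y :: t) 0 0 = x := by
      rw [PySem.List.pyGetD_of_nonneg _ _ (by norm_num)]; rfl
    have hget1 : PySem.List.pyGetD (x :: y :: t) (0 + 1) 0 = y := by
      rw [pvGetD_cons_succ _ _ _ (by norm_num), PySem.List.pyGetD_of_nonneg _ _ (by norm_num)]; rfl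
    rw [hget0, hget1]
    have hcongr : ∀ (acc : Int × Int), ∀ k ∈ PySem.List.pyRange 0 (t.length : Int) 2,
        ((fun (acc : Int × Int) (k : Int) =>
          (acc.1 * 2 + PySem.List.pyGetD (x :: y :: t) k 0,
           acc.2 * 2 + PySem.List.pyGetD (x :: y :: t) (k + 1) 0)) acc (k + 2))
        = ((fun (acc : Int × Int) (k : Int) =>
          (acc.1 * 2 + PySem.List.pyGetD t k 0,
           acc.2 * 2 + PySem.List.pyGetD t (k + 1) 0)) acc k) := by
      intro acc k hk
      have hk0 : 0 ≤ k := ((PySem.List.mem_pyRange_iff_of_pos (by norm_num) k).1 hk).1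
      show (acc.1 * 2 + PySem.List.pyGetD (x :: y :: t) (k + 2) 0,
            acc.2 * 2 + PySem.List.pyGetD (x :: y :: t) (k + 2 + 1) 0)
          = (acc.1 * 2 + PySem.List.pyGetD t k 0, acc.2 * 2 + PySem.List.pyGetD t (k + 1) 0)
      rw [show (k + 2 : Int) = (k + 1) + 1 from by ring,
          pvGetD_cons_succ x (y :: t) (k + 1) (by omega), pvGetD_cons_succ y t k hk0,
          pvGetD_cons_succ x (y :: t) (k + 1 + 1) (by omega), pvGetD_cons_succ y t (k + 1) (by omega)]
    rw [PySem.List.foldl_congr_mem _ _ _ _ hcongr]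
    rw [iht hev' (i * 2 + x) (j * 2 + y)]
    have hl : (x :: y :: t).length / 2 = t.length / 2 + 1 := by simp; omega
    rw [hl]
    have he : pvEvens (x :: y :: t) = x :: pvEvens t := rfl
    have ho : pvEvens (x :: y :: t).tail = y :: pvEvens t.tail := by
      rcases t with _ | ⟨a, t⟩ <;> rfl
    rw [he, ho]
    have hve : pvHorner 0 (x :: pvEvens t) = x * 2 ^ (pvEvens t).length + pvHorner 0 (pvEvens t) := by
      have h0 : pvHorner 0 (x :: pvEvens t) = pvHorner x (pvEvens t) := by simp [pvHorner]
      rw [h0, pvHorner_acc]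
    have hvo : pvHorner 0 (y :: pvEvens t.tail)
        = y * 2 ^ (pvEvens t.tail).length + pvHorner 0 (pvEvens t.tail) := by
      have h0 : pvHorner 0 (y :: pvEvens t.tail) = pvHorner y (pvEvens t.tail) := by simp [pvHorner]
      rw [h0, pvHorner_acc]
    have hle : (pvEvens t).length = t.length / 2 := by rw [pvEvens_length]; omega
    have hlo : (pvEvens t.tail).length = t.length / 2 := by
      rw [pvEvens_length]
      rcases t with _ | ⟨a, t⟩ <;> rfl
    rw [hve, hvo, hle, hlo]
    simp only [Prod.mk.injEq]
    constructor <;> ring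

-- ===== VERDICT (by name: the statement is the Claim_ definition above) =====
theorem convert_to_indices_spec : Claim_equal_convert_to_indices := by
  intro bits _ hpre
  unfold Spec_convert_to_indices convert_to_indices convert_to_indices_alt
  rw [pvSlice_evens, pvSlice_odds]
  simp only [Option.getD_some]
  rw [pvPowSum_eq_horner, pvPowSum_eq_horner]
  rw [pvB_fold bits hpre 0 0]
  simp
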